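-- pv_equiv track=rewrite | github.com/hihung18/IR2 | mohinhvector.py | tao_ds_tutansuatvitri
-- ===== SOURCE A (Python) =====
-- def tao_ds_tutansuatvitri(tu_va_id):
--     i_vitri = 0
--     tu_tansuat_vitri = []
--     tan_suat_tu = 0
--     tu_previuos =""
--     for i in tu_va_id:
--         if i[0] != tu_previuos:
--             tan_suat_tu = 1
--             tu_tansuat_vitri.append((i[0], tan_suat_tu, i_vitri))
--             i_vitri += 1
--             tu_previuos = i[0]
--         else:
--             tan_suat_tu += 1
--             tu_tansuat_vitri[i_vitri-1] = (i[0], tan_suat_tu, i_vitri-1)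
--
--     return tu_tansuat_vitri
-- ===== SOURCE B (Python) =====
-- def tao_ds_tutansuatvitri(tu_va_id):
--     words = [w for w, _ in tu_va_id]
--     n = len(words)
--     starts = [i for i in range(n) if i == 0 or words[i] != words[i - 1]]
--     ends = starts[1:] + [n]
--     return [(words[s], e - s, k) for k, (s, e) in enumerate(zip(starts, ends))]
-- ===== Notes on version B (the rewrite author's own statement) =====
-- stated objective: alternative
-- what changed: Instead of a single pass with a previous-word tracker, counter and in-place mutation of the last entry, B works in stages: it extracts the word list, computes the list of run-boundary indices, pairs each boundary with the next one, and emits each (word, length, index) by subtracting boundary positions - no counter or mutation at all.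
-- crash fix: When the input is nonempty and its first word is the empty string, A raises IndexError (the initial tu_previuos sentinel '' sends the first element to the update branch of an empty list); B returns the normal run list there. — e.g. on tao_ds_tutansuatvitri([("", 7)]): A raises IndexError, B returns [("", 1, 0)]
import Mathlib
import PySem

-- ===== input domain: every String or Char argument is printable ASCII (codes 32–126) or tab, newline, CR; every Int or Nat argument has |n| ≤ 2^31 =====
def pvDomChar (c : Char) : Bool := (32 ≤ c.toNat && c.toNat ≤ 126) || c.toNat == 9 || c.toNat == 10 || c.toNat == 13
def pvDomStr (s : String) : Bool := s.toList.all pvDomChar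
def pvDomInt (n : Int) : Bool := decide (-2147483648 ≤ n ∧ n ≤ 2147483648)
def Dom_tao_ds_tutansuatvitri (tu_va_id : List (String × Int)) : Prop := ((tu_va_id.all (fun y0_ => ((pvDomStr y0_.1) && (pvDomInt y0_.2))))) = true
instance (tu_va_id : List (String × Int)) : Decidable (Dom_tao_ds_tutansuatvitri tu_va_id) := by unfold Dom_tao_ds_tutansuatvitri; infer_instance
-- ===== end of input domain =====

-- B replaces A's single pass (previous-word tracker, counter, in-place mutation of the last
-- entry) by a staged computation: the run-boundary index list, pairs of consecutive
-- boundaries, and run lengths as differences of boundary positions (alternative).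

-- ===== PORT A =====
-- A's loop as structural recursion over the same state
-- (i_vitri, accumulator list, tan_suat_tu, tu_previuos).
def tao_ds_loopA (xs : List (String × Int)) (i_vitri : Int)
    (acc : List (String × Int × Int)) (tan_suat : Int) (prev : String) :
    List (String × Int × Int) :=
  match xs with
  | [] => acc
  | (w, _) :: rest =>
    if w ≠ prev then
      tao_ds_loopA rest (i_vitri + 1) (acc ++ [(w, 1, i_vitri)]) 1 w
    else
      tao_ds_loopA rest i_vitri (acc.set (i_vitri - 1).toNat (w, tan_suat + 1, i_vitri - 1))
        (tan_suat + 1) prev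

def tao_ds_tutansuatvitri (tu_va_id : List (String × Int)) : List (String × Int × Int) :=
  tao_ds_loopA tu_va_id 0 [] 0 ""

-- ===== PORT B =====
-- Source B: words list; starts = boundary indices; ends = starts[1:] + [n];
-- result = [(words[s], e - s, k) for k, (s, e) in enumerate(zip(starts, ends))].
def tao_ds_tutansuatvitri_alt (tu_va_id : List (String × Int)) : List (String × Int × Int) :=
  let words := tu_va_id.map (fun p => p.1)
  let n : Int := (words.length : Int)
  let starts := (PySem.List.pyRange 0 n 1).filter
      (fun i => i == 0 || !(PySem.List.pyGetD words i "" == PySem.List.pyGetD words (i - 1) ""))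
  let ends := PySem.List.slice starts (some 1) none ++ [n]
  (PySem.List.enumerate (starts.zip ends) 0).map
      (fun q => (PySem.List.pyGetD words q.2.1 "", q.2.2 - q.2.1, q.1))

-- ===== PRECONDITION & SPEC =====
-- Pre_ excludes exactly the inputs on which A raises IndexError: a nonempty list whose
-- first word is "" (A's initial tu_previuos sentinel sends it to the mutation branch).
def Pre_tao_ds_tutansuatvitri (tu_va_id : List (String × Int)) : Prop :=
  (tu_va_id.head?.all (fun p => p.1 != "")) = true
instance (tu_va_id : List (String × Int)) : Decidable (Pre_tao_ds_tutansuatvitri tu_va_id) := by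
  unfold Pre_tao_ds_tutansuatvitri; infer_instance

def pvWitness_tao_ds_tutansuatvitri : (List (String × Int)) :=
  [("a", 1), ("a", 2), ("b", 3), ("a", 4)]

-- When the input is nonempty and its first word is "", A raises IndexError; B returns the run list.
def Raises_tao_ds_tutansuatvitri (tu_va_id : List (String × Int)) : Prop :=
  (tu_va_id.head?.any (fun p => p.1 == "")) = true
instance (tu_va_id : List (String × Int)) : Decidable (Raises_tao_ds_tutansuatvitri tu_va_id) := by
  unfold Raises_tao_ds_tutansuatvitri; infer_instance

def pvRaiseWitness_tao_ds_tutansuatvitri : (List (String × Int)) := [("", 7)]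
def pvRaiseWitnessOut_tao_ds_tutansuatvitri : List (String × Int × Int) := [("", 1, 0)]

def Spec_tao_ds_tutansuatvitri (tu_va_id : List (String × Int)) (out : List (String × Int × Int)) : Prop := out = tao_ds_tutansuatvitri_alt tu_va_id
instance (tu_va_id : List (String × Int)) (out : List (String × Int × Int)) : Decidable (Spec_tao_ds_tutansuatvitri tu_va_id out) := by unfold Spec_tao_ds_tutansuatvitri; infer_instance

-- ===== CLAIM (what is proved, stated in full; the proofs are below) =====
def Claim_equal_tao_ds_tutansuatvitri : Prop := ∀ (tu_va_id : List (String × Int)), Dom_tao_ds_tutansuatvitri tu_va_id → Pre_tao_ds_tutansuatvitri tu_va_id → Spec_tao_ds_tutansuatvitri tu_va_id (tao_ds_tutansuatvitri tu_va_id)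

def Claim_raises_tao_ds_tutansuatvitri : Prop :=
  (∀ (tu_va_id : List (String × Int)), Dom_tao_ds_tutansuatvitri tu_va_id →
      Raises_tao_ds_tutansuatvitri tu_va_id → ¬ Pre_tao_ds_tutansuatvitri tu_va_id) ∧
  (Dom_tao_ds_tutansuatvitri (pvRaiseWitness_tao_ds_tutansuatvitri) ∧
    Raises_tao_ds_tutansuatvitri (pvRaiseWitness_tao_ds_tutansuatvitri) ∧
    tao_ds_tutansuatvitri_alt (pvRaiseWitness_tao_ds_tutansuatvitri) = pvRaiseWitnessOut_tao_ds_tutansuatvitri)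

-- ===== LEMMAS AND PROOFS =====

-- Run-decomposition reference function (proof-side only): one triple per maximal run.
def tao_ds_runsW (ws : List String) (idx : Int) : List (String × Int × Int) :=
  match ws with
  | [] => []
  | w :: rest =>
    (w, 1 + ((rest.takeWhile (fun v => v == w)).length : Int), idx) ::
      tao_ds_runsW (rest.dropWhile (fun v => v == w)) (idx + 1)
termination_by ws.length
decreasing_by
  simpa using Nat.lt_succ_of_le (List.length_dropWhile_le _ _)

lemma runsW_nil (idx : Int) : tao_ds_runsW [] idx = [] := by
  rw [tao_ds_runsW]

lemma runsW_cons (w : String) (tail : List String) (idx : Int) :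
    tao_ds_runsW (w :: tail) idx =
      (w, 1 + ((tail.takeWhile (fun v => v == w)).length : Int), idx) ::
        tao_ds_runsW (tail.dropWhile (fun v => v == w)) (idx + 1) := by
  rw [tao_ds_runsW]

lemma set_append_last {α : Type} (front : List α) (x y : α) :
    (front ++ [x]).set front.length y = front ++ [y] := by
  induction front with
  | nil => rfl
  | cons a t ih => simp [ih]

-- Invariant for A's loop: after a run (prev, cnt) was just emitted as the last accumulator
-- entry, the remaining loop extends it over the leading prev-run and then recurses runwise.
lemma loopA_run (xs : List (String × Int)) :
    ∀ (front : List (String × Int × Int)) (prev : String) (cnt : Int),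
      tao_ds_loopA xs ((front.length : Int) + 1) (front ++ [(prev, cnt, (front.length : Int))]) cnt prev =
        front ++ (prev, cnt + (((xs.map (fun p => p.1)).takeWhile (fun v => v == prev)).length : Int), (front.length : Int)) ::
          tao_ds_runsW ((xs.map (fun p => p.1)).dropWhile (fun v => v == prev)) ((front.length : Int) + 1) := by
  induction xs with
  | nil => intro front prev cnt; simp [tao_ds_loopA, tao_ds_runsW]
  | cons hd rest ih =>
    intro front prev cnt
    obtain ⟨w, id⟩ := hd
    by_cases hw : w = prev
    · subst hw
      rw [tao_ds_loopA]
      have hidx : ((front.length : Int) + 1 - 1).toNat = front.length := by simp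
      simp only [if_neg (by simp : ¬ (w ≠ w)), hidx]
      rw [show (front.length : Int) + 1 - 1 = (front.length : Int) by ring,
        set_append_last]
      rw [ih front w (cnt + 1)]
      simp
      ring_nf
    · rw [tao_ds_loopA]
      simp only [if_pos (by simpa using hw)]
      have := ih (front ++ [(prev, cnt, (front.length : Int))]) w 1
      simp only [List.length_append, List.length_cons, List.length_nil] at this
      push_cast at this
      rw [this]
      have hbw : (w == prev) = false := by simpa using hw
      simp only [List.map_cons, List.takeWhile, List.dropWhile, hbw, List.length_nil]
      rw [tao_ds_runsW]
      simp

-- ----- B-side characterisation -----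

def pvStartsOf (ws : List String) : List Int :=
  (PySem.List.pyRange 0 (ws.length : Int) 1).filter
    (fun i => i == 0 || !(PySem.List.pyGetD ws i "" == PySem.List.pyGetD ws (i - 1) ""))

def pvEndsOf (ws : List String) : List Int :=
  PySem.List.slice (pvStartsOf ws) (some 1) none ++ [(ws.length : Int)]

def pvAltCore (ws : List String) (s : Int) : List (String × Int × Int) :=
  (PySem.List.enumerate ((pvStartsOf ws).zip (pvEndsOf ws)) s).map
    (fun q => (PySem.List.pyGetD ws q.2.1 "", q.2.2 - q.2.1, q.1))

lemma alt_eq_altCore (xs : List (String × Int)) :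
    tao_ds_tutansuatvitri_alt xs = pvAltCore (xs.map (fun p => p.1)) 0 := rfl

lemma enumerate_map {α β : Type} (g : α → β) (l : List α) (s : Int) :
    PySem.List.enumerate (l.map g) s =
      (PySem.List.enumerate l s).map (fun q => (q.1, g q.2)) := by
  induction l generalizing s with
  | nil => simp [PySem.List.enumerate_nil]
  | cons a t ih => simp [PySem.List.enumerate_cons, ih]

-- predicate of the boundary filter
def pvP (ws : List String) (i : Int) : Bool :=
  i == 0 || !(PySem.List.pyGetD ws i "" == PySem.List.pyGetD ws (i - 1) "")

lemma startsOf_filter (ws : List String) :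
    pvStartsOf ws = (PySem.List.pyRange 0 (ws.length : Int) 1).filter (pvP ws) := rfl

lemma head?_dropWhile_false {a : Type} (p : a -> Bool) (l : List a) (x : a)
    (h : (l.dropWhile p).head? = some x) : p x = false := by
  induction l with
  | nil => simp at h
  | cons y t ih =>
    by_cases hp : p y
    · simp [hp] at h; exact ih h
    · simp [hp] at h; cases h; simpa using hp

lemma pvGetD_run (w : String) (t r : List String) (ht : ∀ x ∈ t, x = w)
    (i : Nat) (hi : i < t.length + 1) :
    PySem.List.pyGetD ((w :: t) ++ r) (i : Int) "" = w := by
  rw [PySem.List.pyGetD_natCast]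
  cases i with
  | zero => simp
  | succ m =>
    have hm : m < t.length := by omega
    rw [List.cons_append, List.getD_cons_succ, List.getD_append _ _ _ _ hm,
        List.getD_eq_getElem _ _ hm]
    exact ht _ (List.getElem_mem hm)

lemma pvGetD_shift (w : String) (t r : List String) (j : Nat) :
    PySem.List.pyGetD ((w :: t) ++ r) ((t.length + 1 + j : Nat) : Int) "" =
      PySem.List.pyGetD r (j : Int) "" := by
  rw [PySem.List.pyGetD_natCast, PySem.List.pyGetD_natCast,
      List.getD_append_right _ _ _ _ (by simp)]
  congr 1
  simp

lemma pvStartsOf_nil : pvStartsOf [] = [] := by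
  rw [startsOf_filter, PySem.List.pyRange_one_eq_nil (by simp)]
  rfl

lemma pvStartsOf_head (ws : List String) (h : ws ≠ []) :
    ∃ u, pvStartsOf ws = 0 :: u := by
  rw [startsOf_filter, PySem.List.pyRange_one_cons (by simpa using List.length_pos_of_ne_nil h)]
  rw [List.filter_cons]
  simp only [show pvP ws 0 = true by simp [pvP], if_pos]
  exact ⟨_, rfl⟩

lemma pvStartsOf_run (w : String) (t r : List String) (ht : ∀ x ∈ t, x = w)
    (hr : ∀ x, r.head? = some x → (x == w) = false) :
    pvStartsOf ((w :: t) ++ r) =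
      0 :: (pvStartsOf r).map (fun a => ((t.length : Int) + 1 + a)) := by
  have hlen : ((((w :: t) ++ r).length : Nat) : Int) =
      ((t.length : Int) + 1) + (r.length : Int) := by
    simp only [List.length_append, List.length_cons]; push_cast; ring
  rw [startsOf_filter, hlen,
      PySem.List.pyRange_one_append 0 ((t.length : Int) + 1)
        (((t.length : Int) + 1) + (r.length : Int)) (by omega) (by omega),
      List.filter_append]
  have hpart1 : (PySem.List.pyRange 0 ((t.length : Int) + 1) 1).filter (pvP ((w :: t) ++ r)) = [0] := by
    rw [PySem.List.pyRange_one_cons (by omega), List.filter_cons]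
    simp only [show pvP ((w :: t) ++ r) 0 = true by simp [pvP], if_pos]
    have hnil : (PySem.List.pyRange (0 + 1) ((t.length : Int) + 1) 1).filter (pvP ((w :: t) ++ r)) = [] := by
      refine List.filter_eq_nil_iff.mpr ?_
      intro i hi
      have hb := (PySem.List.mem_pyRange_one).mp hi
      obtain ⟨m, rfl⟩ : ∃ m : Nat, i = (m : Int) :=
        ⟨i.toNat, (Int.toNat_of_nonneg (by omega)).symm⟩
      obtain ⟨hb1, hb2⟩ := hb
      have hm1 : 1 ≤ m := by exact_mod_cast hb1
      have hm2 : m < t.length + 1 := by exact_mod_cast hb2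
      have hm3 : m - 1 < t.length + 1 := by omega
      have hsub : ((m : Nat) : Int) - 1 = ((m - 1 : Nat) : Int) := by omega
      simp only [pvP, hsub]
      rw [pvGetD_run w t r ht m hm2, pvGetD_run w t r ht (m - 1) hm3]
      have hmne : ((m : Nat) : Int) ≠ 0 := by
        have h1 : (1 : Int) ≤ ((m : Nat) : Int) := by exact_mod_cast hm1
        omega
      simp
      omega
    rw [hnil]
  rw [hpart1]
  have hpoint : ∀ k : Nat, k < r.length →
      pvP ((w :: t) ++ r) ((t.length : Int) + 1 + (k : Int)) = pvP r ((0 : Int) + (k : Int)) := by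
    intro k hkR
    have hzeroL : (((t.length : Int) + 1 + (k : Int)) == 0) = false := by
      simp only [beq_eq_false_iff_ne, ne_eq]; omega
    have hcast : (t.length : Int) + 1 + (k : Int) = ((t.length + 1 + k : Nat) : Int) := by
      push_cast; ring
    cases k with
    | zero =>
      obtain ⟨x, r', rfl⟩ : ∃ x r', r = x :: r' := by
        cases r with
        | nil => simp at hkR
        | cons x r' => exact ⟨x, r', rfl⟩
      have hx : (x == w) = false := hr x rfl
      have hR : pvP (x :: r') ((0 : Int) + ((0 : Nat) : Int)) = true := by simp [pvP]
      have e : ((t.length : Int) + 1 + ((0 : Nat) : Int)) = ((t.length + 1 + 0 : Nat) : Int) := by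
        push_cast; ring
      have e2 : ((t.length + 1 + 0 : Nat) : Int) - 1 = ((t.length : Nat) : Int) := by
        push_cast; ring
      have hL : pvP ((w :: t) ++ (x :: r')) ((t.length : Int) + 1 + ((0 : Nat) : Int)) = true := by
        simp only [pvP, e]
        rw [pvGetD_shift w t (x :: r') 0, e2, pvGetD_run w t (x :: r') ht t.length (by omega)]
        simp [hx]
      rw [hL, hR]
    | succ m =>
      have h2 : ((t.length + 1 + (m + 1) : Nat) : Int) - 1 = ((t.length + 1 + m : Nat) : Int) := by
        push_cast; ring
      have h3 : ((m + 1 : Nat) : Int) - 1 = ((m : Nat) : Int) := by push_cast; ring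
      have h4 : (((m + 1 : Nat) : Int) == 0) = false := by
        simp only [beq_eq_false_iff_ne, ne_eq]; omega
      have h5 : (((t.length + 1 + (m + 1) : Nat) : Int) == 0) = false := by
        simp only [beq_eq_false_iff_ne, ne_eq]; omega
      simp only [pvP, hcast, zero_add]
      rw [pvGetD_shift w t r (m + 1), h2, pvGetD_shift w t r m, h3, h4, h5]
  have hpart2 : (PySem.List.pyRange ((t.length : Int) + 1)
        (((t.length : Int) + 1) + (r.length : Int)) 1).filter (pvP ((w :: t) ++ r)) =
      (pvStartsOf r).map (fun a => ((t.length : Int) + 1 + a)) := by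
    rw [startsOf_filter, PySem.List.pyRange_one, PySem.List.pyRange_one]
    have e1 : (((t.length : Int) + 1 + (r.length : Int) - ((t.length : Int) + 1)) : Int).toNat = r.length := by
      omega
    have e2 : (((r.length : Int) - 0) : Int).toNat = r.length := by omega
    rw [e1, e2, List.filter_map, List.filter_map, List.map_map]
    have hfun : ((fun a => ((t.length : Int) + 1 + a)) ∘ (fun k : Nat => (0 : Int) + (k : Int))) =
        fun k : Nat => ((t.length : Int) + 1 + (k : Int)) := by
      funext k; simp
    rw [hfun]
    congr 1
    refine List.filter_congr ?_
    intro k hk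
    have hkR : k < r.length := List.mem_range.mp hk
    simpa using hpoint k hkR
  rw [hpart2]
  rfl

lemma qsnd_mem_of_mem_enumerate {a : Type} (l : List a) (s : Int) (q : Int × a)
    (hq : q ∈ PySem.List.enumerate l s) : q.2 ∈ l := by
  induction l generalizing s with
  | nil => simp [PySem.List.enumerate_nil] at hq
  | cons x xs ih =>
    rw [PySem.List.enumerate_cons] at hq
    rcases List.mem_cons.mp hq with h | h
    · subst h; exact List.mem_cons_self
    · exact List.mem_cons_of_mem _ (ih _ h)

lemma mem_startsOf_bounds (ws : List String) (a : Int) (ha : a ∈ pvStartsOf ws) :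
    0 ≤ a ∧ a < (ws.length : Int) := by
  rw [startsOf_filter] at ha
  exact (PySem.List.mem_pyRange_one).mp (List.mem_filter.mp ha).1

lemma main_altCore (N : Nat) : ∀ (ws : List String) (s : Int), ws.length ≤ N →
    pvAltCore ws s = tao_ds_runsW ws s := by
  induction N with
  | zero =>
    intro ws s h
    have hn : ws = [] := by cases ws with | nil => rfl | cons a t => simp at h
    subst hn
    unfold pvAltCore
    rw [pvStartsOf_nil]
    simp [PySem.List.enumerate_nil, tao_ds_runsW]
  | succ N ih =>
    intro ws s hlen
    cases ws with
    | nil =>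
      unfold pvAltCore
      rw [pvStartsOf_nil]
      simp [PySem.List.enumerate_nil, tao_ds_runsW]
    | cons w tail =>
      have htr : tail.takeWhile (fun v => v == w) ++ tail.dropWhile (fun v => v == w) = tail :=
        List.takeWhile_append_dropWhile
      set t := tail.takeWhile (fun v => v == w) with htdef
      set r := tail.dropWhile (fun v => v == w) with hrdef
      have ht : ∀ x ∈ t, x = w := by
        intro x hx
        have := List.mem_takeWhile_imp hx
        simpa using this
      have hr : ∀ x, r.head? = some x → (x == w) = false := by
        intro x hx
        rw [hrdef] at hx
        exact head?_dropWhile_false _ tail x hx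
      have hws : w :: tail = (w :: t) ++ r := by rw [List.cons_append, htr]
      have hrl : r.length ≤ N := by
        have h1 : r.length ≤ tail.length := by
          rw [hrdef]; exact List.length_dropWhile_le _ _
        simp only [List.length_cons] at hlen
        omega
      have hstarts : pvStartsOf (w :: tail) =
          0 :: (pvStartsOf r).map (fun a => ((t.length : Int) + 1 + a)) := by
        rw [hws]; exact pvStartsOf_run w t r ht hr
      have hget0 : PySem.List.pyGetD (w :: tail) 0 "" = w := by
        rw [hws]
        simpa using pvGetD_run w t r ht 0 t.length.succ_pos
      rw [runsW_cons, ← htdef, ← hrdef]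
      cases hre : r with
      | nil =>
        have htail : tail = t := by rw [← htr, hre, List.append_nil]
        unfold pvAltCore pvEndsOf
        rw [hstarts, hre, pvStartsOf_nil]
        simp only [List.map_nil, PySem.List.slice_from_one, List.tail_cons, List.nil_append]
        simp only [List.zip_cons_cons, List.zip_nil_right,
          PySem.List.enumerate_cons, PySem.List.enumerate_nil, List.map_cons, List.map_nil]
        rw [hget0, runsW_nil]
        simp only [htail, List.length_cons]
        push_cast
        norm_num
        ring
      | cons x r' =>
        obtain ⟨u, hu⟩ := pvStartsOf_head r (by rw [hre]; exact List.cons_ne_nil x r')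
        unfold pvAltCore pvEndsOf
        rw [hstarts, hu]
        simp only [List.map_cons, add_zero, PySem.List.slice_from_one, List.tail_cons]
        rw [List.cons_append, List.zip_cons_cons]
        have hn : ((w :: tail).length : Int) = ((t.length : Int) + 1) + (r.length : Int) := by
          rw [hws]
          simp only [List.length_append, List.length_cons]
          push_cast
          ring
        have hz : (((t.length : Int) + 1) :: (u.map (fun a => (t.length : Int) + 1 + a))).zip
              ((u.map (fun a => (t.length : Int) + 1 + a)) ++ [((w :: tail).length : Int)]) =
            ((pvStartsOf r).zip (pvEndsOf r)).map
              (fun z => ((t.length : Int) + 1 + z.1, (t.length : Int) + 1 + z.2)) := by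
          rw [hn]
          have h1 : ((t.length : Int) + 1) :: u.map (fun a => (t.length : Int) + 1 + a) =
              (pvStartsOf r).map (fun a => (t.length : Int) + 1 + a) := by
            rw [hu]; simp
          have h2 : u.map (fun a => (t.length : Int) + 1 + a) ++ [((t.length : Int) + 1) + (r.length : Int)] =
              (pvEndsOf r).map (fun a => (t.length : Int) + 1 + a) := by
            unfold pvEndsOf
            rw [hu, PySem.List.slice_from_one]
            simp
          rw [h1, h2, List.zip_map]
          rfl
        rw [hz, PySem.List.enumerate_cons, enumerate_map]
        simp only [List.map_cons, List.map_map]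
        have hhead : (PySem.List.pyGetD (w :: tail) 0 "", (t.length : Int) + 1 - 0, s) =
            (w, 1 + ((t.length : Nat) : Int), s) := by
          rw [hget0]
          norm_num
          ring
        rw [hhead]
        congr 1
        have htailmap :
            (PySem.List.enumerate ((pvStartsOf r).zip (pvEndsOf r)) (s + 1)).map
              ((fun q => (PySem.List.pyGetD (w :: tail) q.2.1 "", q.2.2 - q.2.1, q.1)) ∘
                (fun q => (q.1, ((t.length : Int) + 1 + q.2.1, (t.length : Int) + 1 + q.2.2)))) =
            (PySem.List.enumerate ((pvStartsOf r).zip (pvEndsOf r)) (s + 1)).map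
              (fun q => (PySem.List.pyGetD r q.2.1 "", q.2.2 - q.2.1, q.1)) := by
          refine List.map_congr_left ?_
          intro q hq
          obtain ⟨qi, qa, qb⟩ := q
          have hmem : (qa, qb) ∈ (pvStartsOf r).zip (pvEndsOf r) :=
            qsnd_mem_of_mem_enumerate _ _ _ hq
          have ha : qa ∈ pvStartsOf r := (List.of_mem_zip hmem).1
          have hab := mem_startsOf_bounds r qa ha
          obtain ⟨m, rfl⟩ : ∃ m : Nat, qa = (m : Int) :=
            ⟨qa.toNat, (Int.toNat_of_nonneg hab.1).symm⟩
          simp only [Function.comp_apply]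
          have hcast : (t.length : Int) + 1 + (m : Int) = ((t.length + 1 + m : Nat) : Int) := by
            push_cast; ring
          rw [hws, hcast, pvGetD_shift w t r m]
          have hsub : ((t.length : Int) + 1 + qb) - (((t.length + 1 + m : Nat) : Nat) : Int) = qb - (m : Int) := by
            push_cast; ring
          rw [hsub]
        rw [htailmap]
        have : (PySem.List.enumerate ((pvStartsOf r).zip (pvEndsOf r)) (s + 1)).map
            (fun q => (PySem.List.pyGetD r q.2.1 "", q.2.2 - q.2.1, q.1)) = pvAltCore r (s + 1) := rfl
        rw [this, ← hre]
        exact ih r (s + 1) hrl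

lemma altCore_eq (ws : List String) (s : Int) : pvAltCore ws s = tao_ds_runsW ws s :=
  main_altCore ws.length ws s le_rfl

-- ===== VERDICT (by name: the statement is the Claim_ definition above) =====
theorem tao_ds_tutansuatvitri_spec : Claim_equal_tao_ds_tutansuatvitri := by
  intro xs _ hpre
  unfold Spec_tao_ds_tutansuatvitri tao_ds_tutansuatvitri
  rw [alt_eq_altCore, altCore_eq]
  match xs, hpre with
  | [], _ => simp [tao_ds_loopA, tao_ds_runsW]
  | (w, id) :: rest, hpre =>
    have hw : w ≠ "" := by simpa [Pre_tao_ds_tutansuatvitri] using hpre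
    rw [tao_ds_loopA]
    simp only [if_pos (by simpa using hw)]
    have := loopA_run rest ([] : List (String × Int × Int)) w 1
    simp only [List.length_nil, Nat.cast_zero, List.nil_append, zero_add] at this ⊢
    rw [this, List.map_cons]
    rw [tao_ds_runsW]
    norm_num

@[simp] theorem tao_ds_tutansuatvitri_raises : Claim_raises_tao_ds_tutansuatvitri := by
  unfold Claim_raises_tao_ds_tutansuatvitri
  constructor
  · intro xs _ hr hp
    cases xs with
    | nil => simp [Raises_tao_ds_tutansuatvitri] at hr
    | cons h t =>
      simp [Raises_tao_ds_tutansuatvitri] at hr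
      simp [Pre_tao_ds_tutansuatvitri, hr] at hp
  · exact ⟨by decide, by decide, by decide⟩
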